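-- pv_equiv track=rewrite | github.com/lilsweetcaligula/codewars | solutions/python/178.py | repeat_sum
-- ===== SOURCE A (Python) =====
-- def repeat_sum(sequences):
--     from itertools import chain
--     from collections import Counter
--     result = []
--     counter = Counter(
--         chain(
--             *(set(sequence) for sequence in sequences)
--         )).items()
--     for item, count in counter:
--         if count > 1:
--             result.append(item)
--     return sum(result)
-- ===== SOURCE B (Python) =====
-- def repeat_sum(sequences):
--     items = sorted(x for seq in sequences for x in set(seq))
--     total = 0
--     i, n = 0, len(items)
--     while i < n:
--         j = i + 1
--         while j < n and items[j] == items[i]: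
--             j += 1
--         if j - i > 1:
--             total += items[i]
--         i = j
--     return total
-- ===== Notes on version B (the rewrite author's own statement) =====
-- stated objective: alternative
-- what changed: Replaces hash counting (Counter build, then a filter pass over items) with sort-then-scan: sort the per-sequence-deduplicated elements and sweep once over runs of equal values, adding the value of each run of length > 1.
import Mathlib
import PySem

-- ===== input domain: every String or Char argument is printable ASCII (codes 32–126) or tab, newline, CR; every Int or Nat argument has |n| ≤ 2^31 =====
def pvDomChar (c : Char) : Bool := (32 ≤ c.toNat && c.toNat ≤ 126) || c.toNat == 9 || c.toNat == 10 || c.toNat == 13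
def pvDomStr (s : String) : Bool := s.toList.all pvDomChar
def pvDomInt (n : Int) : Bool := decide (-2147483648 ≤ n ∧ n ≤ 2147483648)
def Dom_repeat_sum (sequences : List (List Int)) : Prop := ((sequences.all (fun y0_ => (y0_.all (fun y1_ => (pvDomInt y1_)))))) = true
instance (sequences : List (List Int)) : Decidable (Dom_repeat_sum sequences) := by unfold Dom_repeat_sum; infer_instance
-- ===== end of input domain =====

-- B replaces A's Counter-then-filter hash counting with sort-then-scan over runs of equal values; return values only.

-- ===== PORT A =====
def repeat_sum (sequences : List (List Int)) : Int :=
  let result : List Int := []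
  -- chain(*(set(sequence) for sequence in sequences))
  let chained := sequences.flatMap (fun sequence => PySem.Set.ofList sequence)
  let counter := (PySem.Dict.counter chained).items
  let result := counter.foldl (fun r p => if p.2 > 1 then r ++ [p.1] else r) result
  result.sum

-- ===== PORT B =====
-- the outer while loop of B: split off the run of elements equal to the head
-- (the inner 'while j < n and items[j] == items[i]' is the takeWhile/dropWhile split)
def rsScan : List Int → Int
  | [] => 0
  | x :: rest =>
      (if (rest.takeWhile (fun y => y == x)).length + 1 > 1 then x else 0)
        + rsScan (rest.dropWhile (fun y => y == x))
termination_by l => l.length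
decreasing_by
  simp only [List.length_cons]
  exact Nat.lt_succ_of_le (List.length_dropWhile_le _ _)

def repeat_sum_alt (sequences : List (List Int)) : Int :=
  let items := PySem.List.sorted (sequences.flatMap (fun sequence => PySem.Set.ofList sequence)) (fun x => x) false
  rsScan items

-- ===== PRECONDITION & SPEC =====
def Spec_repeat_sum (sequences : List (List Int)) (out : Int) : Prop := out = repeat_sum_alt sequences
instance (sequences : List (List Int)) (out : Int) : Decidable (Spec_repeat_sum sequences out) := by unfold Spec_repeat_sum; infer_instance

-- ===== CLAIM (what is proved, stated in full; the proofs are below) =====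
def Claim_equal_repeat_sum : Prop := ∀ (sequences : List (List Int)), Dom_repeat_sum sequences → Spec_repeat_sum sequences (repeat_sum sequences)

-- ===== LEMMAS AND PROOFS =====

-- the common value: sum of the distinct elements occurring at least twice in L
def rsTarget (L : List Int) : Int := ∑ x ∈ L.toFinset.filter (fun x => 2 ≤ L.count x), x

-- A's result list as a filter
theorem rs_foldl_append_if (l : List (Int × Int)) (acc : List Int) :
    l.foldl (fun r p => if p.2 > 1 then r ++ [p.1] else r) acc
      = acc ++ (l.filter (fun p => decide (p.2 > 1))).map Prod.fst := by
  induction l generalizing acc with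
  | nil => simp
  | cons a t ih =>
      by_cases h : a.2 > 1 <;> simp [ih, h]

-- A computes rsTarget of the flattened stream
theorem rsA_eq (L : List Int) :
    (((PySem.Dict.counter L).items).foldl (fun r p => if p.2 > 1 then r ++ [p.1] else r) []).sum
      = rsTarget L := by
  rw [PySem.Dict.items_counter, rs_foldl_append_if, List.nil_append]
  have hfm : ((((PySem.Set.ofList L).map (fun k => (k, (L.count k : Int)))).filter
      (fun p => decide (p.2 > 1))).map Prod.fst)
      = (PySem.Set.ofList L).filter (fun k => decide ((L.count k : Int) > 1)) := by
    rw [List.filter_map, List.map_map]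
    simp [Function.comp_def]
  rw [hfm]
  have hnd : ((PySem.Set.ofList L).filter (fun k => decide ((L.count k : Int) > 1))).Nodup :=
    List.Nodup.filter _ (PySem.Set.nodup_ofList L)
  have := List.sum_toFinset (l := (PySem.Set.ofList L).filter (fun k => decide ((L.count k : Int) > 1))) id hnd
  rw [List.map_id] at this
  rw [← this]
  unfold rsTarget
  have hset : ((PySem.Set.ofList L).filter (fun k => decide ((L.count k : Int) > 1))).toFinset
      = L.toFinset.filter (fun x => 2 ≤ L.count x) := by
    ext x
    simp [PySem.Set.mem_ofList]
    omega
  rw [hset]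
  rfl

-- B's run scan computes rsTarget on any sorted list
theorem rsScan_eq (M : List Int) (h : M.Pairwise (· ≤ ·)) : rsScan M = rsTarget M := by
  induction M using rsScan.induct with
  | case1 => simp [rsScan, rsTarget]
  | case2 x rest ih =>
      rw [rsScan]
      set run := rest.takeWhile (fun y => y == x) with hrun
      set rest' := rest.dropWhile (fun y => y == x) with hrest'
      have hsplit : rest = run ++ rest' := (List.takeWhile_append_dropWhile).symm
      have hrunx : ∀ y ∈ run, y = x := by
        intro y hy
        have := List.mem_takeWhile_imp hy
        simpa using this
      have hle : ∀ y ∈ rest, x ≤ y := by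
        intro y hy; exact (List.pairwise_cons.mp h).1 y hy
      have hrest'p : rest'.Pairwise (· ≤ ·) := by
        have : rest.Pairwise (· ≤ ·) := (List.pairwise_cons.mp h).2
        exact (hsplit ▸ this).sublist (List.sublist_append_right run rest')
      have hxnot : x ∉ rest' := by
        intro hx
        cases hh : rest' with
        | nil => simp [hh] at hx
        | cons y0 ys =>
            have hy0ne : ¬ ((y0 == x) = true) := by
              have := List.head?_dropWhile_not (fun y => y == x) rest
              rw [← hrest', hh] at this
              simpa using this
            have hy0x : y0 ≠ x := by simpa using hy0ne
            have hy0mem : y0 ∈ rest := by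
              rw [hsplit, hh]; simp
            have hxy0 : x < y0 := lt_of_le_of_ne (hle y0 hy0mem) (Ne.symm hy0x)
            rw [hh] at hx
            rcases List.mem_cons.mp hx with h1 | h2
            · omega
            · have : y0 ≤ x := by
                rw [hh] at hrest'p
                exact (List.pairwise_cons.mp hrest'p).1 x h2
              omega
      -- counts in M = x :: run ++ rest'
      have hcx : (x :: rest).count x = run.length + 1 := by
        rw [hsplit]
        have h1 : run.count x = run.length := List.count_eq_length.mpr (fun y hy => by
          have := hrunx y hy; simp [this])
        have h2 : rest'.count x = 0 := List.count_eq_zero.mpr hxnot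
        simp [List.count_append, h1, h2]
      have hcy : ∀ y, y ≠ x → (x :: rest).count y = rest'.count y := by
        intro y hyx
        rw [hsplit]
        have h1 : run.count y = 0 := List.count_eq_zero.mpr (fun hy => hyx (hrunx y hy))
        simp [List.count_append, h1, Ne.symm hyx]
      -- finset of M
      have hfs : (x :: rest).toFinset = insert x rest'.toFinset := by
        rw [hsplit]
        ext y
        simp only [List.toFinset_cons, List.toFinset_append, Finset.mem_insert,
          Finset.mem_union, List.mem_toFinset]
        constructor
        · rintro (h1 | h1 | h1)
          · exact Or.inl h1
          · exact Or.inl (hrunx y h1)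
          · exact Or.inr h1
        · rintro (h1 | h1)
          · exact Or.inl h1
          · exact Or.inr (Or.inr h1)
      have hIH : rsScan rest' = rsTarget rest' := ih hrest'p
      rw [hIH]
      unfold rsTarget
      rw [hfs]
      rw [Finset.filter_insert]
      have hfilter : rest'.toFinset.filter (fun y => 2 ≤ (x :: rest).count y)
          = rest'.toFinset.filter (fun y => 2 ≤ rest'.count y) := by
        apply Finset.filter_congr
        intro y hy
        have hyx : y ≠ x := fun hh => hxnot (hh ▸ List.mem_toFinset.mp hy)
        rw [hcy y hyx]
      by_cases hc : 2 ≤ (x :: rest).count x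
      · rw [if_pos hc, hfilter]
        have hxn : x ∉ rest'.toFinset.filter (fun y => 2 ≤ rest'.count y) := by
          simp only [Finset.mem_filter, List.mem_toFinset]
          intro hh; exact hxnot hh.1
        rw [Finset.sum_insert hxn]
        have hrl : run.length + 1 > 1 := by rw [hcx] at hc; omega
        rw [if_pos hrl]
      · rw [if_neg hc, hfilter]
        have hrl : ¬ (run.length + 1 > 1) := by rw [hcx] at hc; omega
        rw [if_neg hrl]
        simp

-- rsTarget only depends on the multiset of L
theorem rsTarget_perm {L M : List Int} (h : L.Perm M) : rsTarget L = rsTarget M := by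
  unfold rsTarget
  rw [List.toFinset_eq_of_perm _ _ h]
  apply Finset.sum_congr
  · apply Finset.filter_congr
    intro y _
    rw [h.count_eq]
  · intros; rfl

-- ===== VERDICT (by name: the statement is the Claim_ definition above) =====
theorem repeat_sum_spec : Claim_equal_repeat_sum := by
  intro sequences _
  unfold Spec_repeat_sum repeat_sum repeat_sum_alt
  simp only []
  set L := sequences.flatMap (fun sequence => PySem.Set.ofList sequence) with hL
  rw [rsA_eq L]
  rw [rsScan_eq _ (by simpa using PySem.List.sorted_pairwise L (fun x => x) )]
  exact rsTarget_perm (PySem.List.sorted_perm L (fun x => x) false).symm
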